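-- pv_equiv track=rewrite | github.com/royayij/MisConfLinter | MisConfLinter/misconftypes/parsing.py | subset_common_list
-- ===== SOURCE A (Python) =====
-- def subset_common_list(lst):
--     subsets = []
--
--     for i in range(len(lst)):
--         for j in range(i + 1, len(lst) + 1):
--             subset = lst[i:j]
--             subsets.append(subset)
--
--     result = []
--     for i in range(len(subsets)):
--         for j in range(i + 1, len(subsets)):
--             if len(subsets[i]) + len(subsets[j]) <= len(lst):
--                 merged = subsets[i] + subsets[j]
--                 if len(merged) > 1:
--                     result.append(merged)
--     result_f = set()
--     for item in result:
--         item = list(dict.fromkeys(item))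
--         result_f.add(tuple(item))
--     return result_f
-- ===== SOURCE B (Python) =====
-- def subset_common_list(lst):
--     # Alternative decomposition: no precomputed subsets table and no intermediate
--     # result list; enumerate ordered pairs of slice boundaries directly (for each
--     # first slice, its same-start longer slices, then all later-start slices) and
--     # add the deduplicated concatenation straight into the output set.
--     n = len(lst)
--     out = set()
--
--     def emit(i1, j1, i2, j2):
--         total = (j1 - i1) + (j2 - i2)
--         if total <= n and total > 1:
--             out.add(tuple(dict.fromkeys(lst[i1:j1] + lst[i2:j2])))
--
--     for i1 in range(n):
--         for j1 in range(i1 + 1, n + 1):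
--             for j2 in range(j1 + 1, n + 1):
--                 emit(i1, j1, i1, j2)
--             for i2 in range(i1 + 1, n):
--                 for j2 in range(i2 + 1, n + 1):
--                     emit(i1, j1, i2, j2)
--     return out
-- ===== Notes on version B (the rewrite author's own statement) =====
-- stated objective: alternative
-- what changed: Drops the precomputed subsets table and the intermediate result list: enumerates ordered pairs of slice boundaries directly (same-start longer slices, then later-start slices), tests the length condition arithmetically on the boundaries, and inserts the deduplicated concatenation straight into the output set in a single fused pass.
import Mathlib
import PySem

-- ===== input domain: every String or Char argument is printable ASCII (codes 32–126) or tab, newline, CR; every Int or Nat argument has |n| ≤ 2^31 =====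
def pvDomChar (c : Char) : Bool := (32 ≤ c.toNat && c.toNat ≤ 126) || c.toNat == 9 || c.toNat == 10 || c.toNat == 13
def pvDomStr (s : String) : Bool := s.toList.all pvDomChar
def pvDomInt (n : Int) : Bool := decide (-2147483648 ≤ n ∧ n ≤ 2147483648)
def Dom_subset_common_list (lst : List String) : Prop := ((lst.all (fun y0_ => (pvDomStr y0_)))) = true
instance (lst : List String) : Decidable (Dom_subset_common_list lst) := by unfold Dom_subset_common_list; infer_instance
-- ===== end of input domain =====

-- B drops A's precomputed subsets table and intermediate result list: it enumerates the
-- ordered pairs of slice boundaries directly and fuses dedup + set insertion into the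
-- enumeration (objective: alternative decomposition, same output).

-- ===== PORT A =====
def subset_common_list (lst : List String) : List (List String) :=
  let subsets : List (List String) :=
    (PySem.List.pyRange 0 (PySem.List.len lst) 1).foldl (fun subsets i =>
      (PySem.List.pyRange (i+1) (PySem.List.len lst + 1) 1).foldl (fun subsets j =>
        subsets ++ [PySem.List.slice lst (some i) (some j)]) subsets) []
  let result : List (List String) :=
    (PySem.List.pyRange 0 (PySem.List.len subsets) 1).foldl (fun result i =>
      (PySem.List.pyRange (i+1) (PySem.List.len subsets) 1).foldl (fun result j =>
        if PySem.List.len (PySem.List.pyGetD subsets i []) + PySem.List.len (PySem.List.pyGetD subsets j []) ≤ PySem.List.len lst then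
          let merged := PySem.List.pyGetD subsets i [] ++ PySem.List.pyGetD subsets j []
          if PySem.List.len merged > 1 then result ++ [merged] else result
        else result) result) []
  result.foldl (fun s item => PySem.Set.add s (PySem.List.dedup item)) PySem.Set.empty

-- ===== PORT B =====
-- helper: Python B's nested 'emit' (condition on the boundaries, direct set insertion)
def pvEmit (lst : List String) (n i1 j1 i2 j2 : Int) (out : PySem.Set (List String)) : PySem.Set (List String) :=
  if (j1 - i1) + (j2 - i2) ≤ n ∧ (j1 - i1) + (j2 - i2) > 1 then
    PySem.Set.add out (PySem.List.dedup
      (PySem.List.slice lst (some i1) (some j1) ++ PySem.List.slice lst (some i2) (some j2)))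
  else out

def subset_common_list_alt (lst : List String) : List (List String) :=
  let n : Int := PySem.List.len lst
  (PySem.List.pyRange 0 n 1).foldl (fun out i1 =>
    (PySem.List.pyRange (i1+1) (n+1) 1).foldl (fun out j1 =>
      let out := (PySem.List.pyRange (j1+1) (n+1) 1).foldl (fun out j2 =>
        pvEmit lst n i1 j1 i1 j2 out) out
      (PySem.List.pyRange (i1+1) n 1).foldl (fun out i2 =>
        (PySem.List.pyRange (i2+1) (n+1) 1).foldl (fun out j2 =>
          pvEmit lst n i1 j1 i2 j2 out) out) out) out) PySem.Set.empty

-- ===== PRECONDITION & SPEC =====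
def Spec_subset_common_list (lst : List String) (out : List (List String)) : Prop := out = subset_common_list_alt lst
instance (lst : List String) (out : List (List String)) : Decidable (Spec_subset_common_list lst out) := by unfold Spec_subset_common_list; infer_instance

-- ===== CLAIM (what is proved, stated in full; the proofs are below) =====
def Claim_equal_subset_common_list : Prop := ∀ (lst : List String), Dom_subset_common_list lst → Spec_subset_common_list lst (subset_common_list lst)

-- ===== LEMMAS AND PROOFS =====

-- the slice lst[i:j]
def pvSl (lst : List String) (i j : Int) : List String := PySem.List.slice lst (some i) (some j)

-- fold g over all ordered pairs (earlier, later) of a list, in A's enumeration order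
def pvPairFold {α β : Type} (g : β → α → α → β) : List α → β → β
  | [], b => b
  | x :: xs, b => pvPairFold g xs (xs.foldl (fun r y => g r x y) b)

-- A's result-building step (list form)
def pvGL (lst : List String) (r : List (List String)) (x y : List String) : List (List String) :=
  if PySem.List.len x + PySem.List.len y ≤ PySem.List.len lst then
    if PySem.List.len (x ++ y) > 1 then r ++ [x ++ y] else r
  else r

-- fused step: conditionally add the deduplicated merge to the set
def pvStep (lst : List String) (s : List (List String)) (x y : List String) : List (List String) :=
  if PySem.List.len x + PySem.List.len y ≤ PySem.List.len lst then
    if PySem.List.len (x ++ y) > 1 then PySem.Set.add s (PySem.List.dedup (x ++ y)) else s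
  else s

def pvAddD (s : List (List String)) (item : List String) : List (List String) :=
  PySem.Set.add s (PySem.List.dedup item)

-- the group of subarrays of lst that start at index i
def pvBlock (lst : List String) (i : Int) : List (List String) :=
  (PySem.List.pyRange (i+1) (PySem.List.len lst + 1) 1).map (pvSl lst i)

lemma pv_len_sl (lst : List String) {i j : Int} (h0 : 0 ≤ i) (h1 : i ≤ j)
    (h2 : j ≤ PySem.List.len lst) : PySem.List.len (pvSl lst i j) = j - i := by
  unfold pvSl
  rw [PySem.List.slice_toNat lst h0 (le_trans h0 h1)]
  simp [PySem.List.len] at h2 ⊢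
  omega

lemma pv_emit_eq (lst : List String) {i1 j1 i2 j2 : Int}
    (hb : 0 ≤ i1 ∧ i1 < j1 ∧ j1 ≤ PySem.List.len lst ∧ 0 ≤ i2 ∧ i2 < j2 ∧ j2 ≤ PySem.List.len lst)
    (out : List (List String)) :
    pvEmit lst (PySem.List.len lst) i1 j1 i2 j2 out = pvStep lst out (pvSl lst i1 j1) (pvSl lst i2 j2) := by
  obtain ⟨h1, h2, h3, h4, h5, h6⟩ := hb
  have l1 := pv_len_sl lst h1 (le_of_lt h2) h3
  have l2 := pv_len_sl lst h4 (le_of_lt h5) h6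
  have lapp : PySem.List.len (pvSl lst i1 j1 ++ pvSl lst i2 j2)
      = (j1 - i1) + (j2 - i2) := by
    simp [PySem.List.len] at l1 l2 ⊢; omega
  unfold pvEmit pvStep pvSl
  rw [show PySem.List.slice lst (some i1) (some j1) = pvSl lst i1 j1 from rfl,
      show PySem.List.slice lst (some i2) (some j2) = pvSl lst i2 j2 from rfl]
  rw [l1, l2, lapp]
  split_ifs <;> tauto

lemma pv_fuse_inner (lst : List String) (xs : List (List String)) (x : List String) :
    ∀ (acc s0 : List (List String)),
      (xs.foldl (fun r y => pvGL lst r x y) acc).foldl pvAddD s0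
        = xs.foldl (fun s y => pvStep lst s x y) (acc.foldl pvAddD s0) := by
  induction xs with
  | nil => intro acc s0; rfl
  | cons y ys ih =>
    intro acc s0
    simp only [List.foldl_cons]
    rw [ih]
    congr 1
    unfold pvGL pvStep
    split_ifs <;> simp [pvAddD]

lemma pv_fuse (lst : List String) :
    ∀ (S : List (List String)) (acc s0 : List (List String)),
      (pvPairFold (pvGL lst) S acc).foldl pvAddD s0
        = pvPairFold (pvStep lst) S (acc.foldl pvAddD s0) := by
  intro S
  induction S with
  | nil => intro acc s0; rfl
  | cons x xs ih =>
    intro acc s0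
    simp only [pvPairFold]
    rw [ih, pv_fuse_inner]

lemma pv_idx {β : Type} (S : List (List String)) (g : β → List String → List String → β) :
    ∀ (k a : Nat) (init : β), a + k = S.length →
      ((PySem.List.pyRange (a : Int) (PySem.List.len S) 1).foldl (fun r i =>
        (PySem.List.pyRange (i+1) (PySem.List.len S) 1).foldl (fun r j =>
          g r (PySem.List.pyGetD S i []) (PySem.List.pyGetD S j [])) r) init)
        = pvPairFold g (S.drop a) init := by
  intro k
  induction k with
  | zero =>
    intro a init ha
    have : a = S.length := by omega
    subst this
    rw [PySem.List.pyRange_one_eq_nil (by simp [PySem.List.len])]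
    simp [pvPairFold]
  | succ k ih =>
    intro a init ha
    have hlt : (a : Int) < PySem.List.len S := by simp [PySem.List.len]; omega
    rw [PySem.List.pyRange_one_cons hlt]
    simp only [List.foldl_cons]
    have hcast : (a : Int) + 1 = ((a + 1 : Nat) : Int) := by push_cast; ring
    rw [hcast, ih (a+1) _ (by omega)]
    have hd : S.drop a = S[a]'(by omega) :: S.drop (a+1) := List.drop_eq_getElem_cons (by omega)
    rw [hd]
    simp only [pvPairFold]
    congr 1
    rw [← hcast, PySem.List.foldl_pyRange_pyGetD S [] (fun r y => g r (PySem.List.pyGetD S (a:Int) []) y) init (by omega)]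
    have : PySem.List.pyGetD S (a:Int) [] = S[a]'(by omega) := by
      rw [PySem.List.pyGetD_natCast, List.getD_eq_getElem?_getD, List.getElem?_eq_getElem (by omega)]
      rfl
    rw [this]
    norm_num

lemma pv_subsets (lst : List String) :
    ((PySem.List.pyRange 0 (PySem.List.len lst) 1).foldl (fun subsets i =>
      (PySem.List.pyRange (i+1) (PySem.List.len lst + 1) 1).foldl (fun subsets j =>
        subsets ++ [PySem.List.slice lst (some i) (some j)]) subsets) [])
      = (PySem.List.pyRange 0 (PySem.List.len lst) 1).flatMap (pvBlock lst) := by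
  rw [← List.nil_append (List.flatMap (pvBlock lst) _), ← PySem.List.foldl_append_eq_flatMap]
  apply PySem.List.foldl_congr_mem
  intro acc i _
  rw [pvBlock]
  exact PySem.List.foldl_append_singleton_eq_map (fun j => PySem.List.slice lst (some i) (some j)) _ acc

lemma pv_cross {β : Type} (lst : List String) (g : β → List String → List String → β)
    (C : List (List String)) (i0 : Int) :
    ∀ (k : Nat) (j0 : Int) (init : β), j0 + k = PySem.List.len lst + 1 →
      pvPairFold g (((PySem.List.pyRange j0 (PySem.List.len lst + 1) 1).map (pvSl lst i0)) ++ C) init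
        = pvPairFold g C ((PySem.List.pyRange j0 (PySem.List.len lst + 1) 1).foldl
            (fun out j1 => C.foldl (fun o y => g o (pvSl lst i0 j1) y)
              ((PySem.List.pyRange (j1+1) (PySem.List.len lst + 1) 1).foldl
                (fun o j2 => g o (pvSl lst i0 j1) (pvSl lst i0 j2)) out)) init) := by
  intro k
  induction k with
  | zero =>
    intro j0 init h
    rw [PySem.List.pyRange_one_eq_nil (by omega)]
    rfl
  | succ k ih =>
    intro j0 init h
    rw [PySem.List.pyRange_one_cons (by omega)]
    simp only [List.map_cons, List.cons_append, List.foldl_cons]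
    simp only [pvPairFold]
    rw [List.foldl_append, List.foldl_map]
    exact ih (j0+1) _ (by omega)

lemma pv_blocksLoop {β : Type} (lst : List String) (g : β → List String → List String → β) :
    ∀ (k : Nat) (i0 : Int) (init : β), i0 + k = PySem.List.len lst →
      pvPairFold g ((PySem.List.pyRange i0 (PySem.List.len lst) 1).flatMap (pvBlock lst)) init
        = (PySem.List.pyRange i0 (PySem.List.len lst) 1).foldl (fun out i1 =>
            (PySem.List.pyRange (i1+1) (PySem.List.len lst + 1) 1).foldl (fun out j1 =>
              ((PySem.List.pyRange (i1+1) (PySem.List.len lst) 1).flatMap (pvBlock lst)).foldl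
                  (fun o y => g o (pvSl lst i1 j1) y)
                ((PySem.List.pyRange (j1+1) (PySem.List.len lst + 1) 1).foldl
                  (fun o j2 => g o (pvSl lst i1 j1) (pvSl lst i1 j2)) out)) out) init := by
  intro k
  induction k with
  | zero =>
    intro i0 init h
    rw [PySem.List.pyRange_one_eq_nil (by omega)]
    rfl
  | succ k ih =>
    intro i0 init h
    rw [PySem.List.pyRange_one_cons (by omega)]
    simp only [List.flatMap_cons, List.foldl_cons]
    rw [show pvBlock lst i0 ++ List.flatMap (pvBlock lst) (PySem.List.pyRange (i0+1) (PySem.List.len lst))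
          = ((PySem.List.pyRange (i0+1) (PySem.List.len lst + 1) 1).map (pvSl lst i0))
            ++ List.flatMap (pvBlock lst) (PySem.List.pyRange (i0+1) (PySem.List.len lst)) from rfl]
    rw [pv_cross lst g _ i0 (PySem.List.len lst - i0).toNat (i0+1) init (by omega)]
    exact ih (i0+1) _ (by omega)

lemma pv_idxA (lst : List String) (S : List (List String)) :
    ∀ (k a : Nat) (init : List (List String)), a + k = S.length →
      ((PySem.List.pyRange (a:Int) (PySem.List.len S) 1).foldl (fun result i =>
        (PySem.List.pyRange (i+1) (PySem.List.len S) 1).foldl (fun result j =>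
          if PySem.List.len (PySem.List.pyGetD S i []) + PySem.List.len (PySem.List.pyGetD S j []) ≤ PySem.List.len lst then
            let merged := PySem.List.pyGetD S i [] ++ PySem.List.pyGetD S j []
            if PySem.List.len merged > 1 then result ++ [merged] else result
          else result) result) init)
        = pvPairFold (pvGL lst) (S.drop a) init :=
  pv_idx S (pvGL lst)

lemma pv_A (lst : List String) :
    subset_common_list lst
      = pvPairFold (pvStep lst) ((PySem.List.pyRange 0 (PySem.List.len lst) 1).flatMap (pvBlock lst)) [] := by
  simp only [subset_common_list]
  rw [pv_subsets lst]
  have h1 := pv_idxA lst ((PySem.List.pyRange 0 (PySem.List.len lst) 1).flatMap (pvBlock lst))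
    ((PySem.List.pyRange 0 (PySem.List.len lst) 1).flatMap (pvBlock lst)).length 0 [] (by omega)
  simp only [Nat.cast_zero, List.drop_zero] at h1
  rw [h1]
  rw [show (fun (s : List (List String)) (item : List String) => PySem.Set.add s (PySem.List.dedup item)) = pvAddD from rfl]
  rw [pv_fuse lst]
  rfl

lemma pv_B (lst : List String) :
    subset_common_list_alt lst
      = pvPairFold (pvStep lst) ((PySem.List.pyRange 0 (PySem.List.len lst) 1).flatMap (pvBlock lst)) [] := by
  have hlen : (0:Int) + (PySem.List.len lst).toNat = PySem.List.len lst := by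
    simp [PySem.List.len]
  rw [pv_blocksLoop lst (pvStep lst) (PySem.List.len lst).toNat 0 [] hlen]
  simp only [subset_common_list_alt]
  apply PySem.List.foldl_congr_mem
  intro out i1 hi1
  rw [PySem.List.mem_pyRange_one] at hi1
  apply PySem.List.foldl_congr_mem
  intro out1 j1 hj1
  rw [PySem.List.mem_pyRange_one] at hj1
  have hj2fold :
      (PySem.List.pyRange (j1+1) (PySem.List.len lst + 1) 1).foldl
        (fun o j2 => pvEmit lst (PySem.List.len lst) i1 j1 i1 j2 o) out1
      = (PySem.List.pyRange (j1+1) (PySem.List.len lst + 1) 1).foldl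
        (fun o j2 => pvStep lst o (pvSl lst i1 j1) (pvSl lst i1 j2)) out1 := by
    apply PySem.List.foldl_congr_mem
    intro o j2 hj2
    rw [PySem.List.mem_pyRange_one] at hj2
    exact pv_emit_eq lst ⟨by omega, by omega, by omega, by omega, by omega, by omega⟩ o
  rw [hj2fold, List.foldl_flatMap]
  apply PySem.List.foldl_congr_mem
  intro o i2 hi2
  rw [PySem.List.mem_pyRange_one] at hi2
  rw [pvBlock, List.foldl_map]
  apply PySem.List.foldl_congr_mem
  intro o2 j2 hj2
  rw [PySem.List.mem_pyRange_one] at hj2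
  exact pv_emit_eq lst ⟨by omega, by omega, by omega, by omega, by omega, by omega⟩ o2

-- ===== VERDICT (by name: the statement is the Claim_ definition above) =====
theorem subset_common_list_spec : Claim_equal_subset_common_list := by
  intro lst _
  unfold Spec_subset_common_list
  rw [pv_A lst, pv_B lst]
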